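-- pv_equiv track=rewrite | github.com/xiaxinmeng/DynamicTypinginPython | decide_dynamic_typing.py | vDynamic
-- ===== SOURCE A (Python) =====
-- def vDynamic(dtype,dlist):
-- 	dynDic = {}
-- 	for item in dlist:
-- 		path = item[0]
-- 		if path in dynDic.keys():
-- 			if "RDT" in dynDic[path].keys():
-- 				dynDic[path][dtype] = dynDic[path]["RDT"] + 1
-- 			else:
-- 				dynDic[path][dtype] = 1
-- 		else:
-- 			dynDic[path] = {dtype:1}
-- 	return dynDic
-- ===== SOURCE B (Python) =====
-- def vDynamic(dtype, dlist):
--     counts = {}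
--     for item in dlist:
--         counts[item[0]] = counts.get(item[0], 0) + 1
--     return {p: {dtype: (c if dtype == "RDT" else 1)} for p, c in counts.items()}
-- ===== Notes on version B (the rewrite author's own statement) =====
-- stated objective: simpler
-- what changed: Replaces the incremental nested-dict single pass with its RDT branching by a count-then-emit structure: first tally occurrences per path, then emit {path: {dtype: count if dtype=='RDT' else 1}} in one comprehension.
import Mathlib
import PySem

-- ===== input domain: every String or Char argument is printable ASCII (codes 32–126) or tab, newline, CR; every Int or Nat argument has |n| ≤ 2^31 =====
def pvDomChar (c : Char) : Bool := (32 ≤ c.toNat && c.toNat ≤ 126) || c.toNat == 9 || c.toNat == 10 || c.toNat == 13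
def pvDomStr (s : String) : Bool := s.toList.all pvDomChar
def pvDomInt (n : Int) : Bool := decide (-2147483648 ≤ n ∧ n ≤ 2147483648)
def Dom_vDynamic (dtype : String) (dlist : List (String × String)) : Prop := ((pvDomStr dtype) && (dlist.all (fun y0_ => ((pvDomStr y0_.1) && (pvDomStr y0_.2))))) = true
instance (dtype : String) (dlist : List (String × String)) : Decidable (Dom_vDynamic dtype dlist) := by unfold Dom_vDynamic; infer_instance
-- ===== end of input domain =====

-- B is simpler (count-then-emit), not faster; the equivalence rests on dtype being constant for the call.

-- ===== PORT A =====
-- one loop step of A: look path up, branch on "RDT" membership of the inner dict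
def vDynamicStep (dtype : String) (dynDic : PySem.Dict String (PySem.Dict String Int))
    (item : String × String) : PySem.Dict String (PySem.Dict String Int) :=
  let path := item.1
  match dynDic.get? path with
  | some inner =>
    match inner.get? "RDT" with
    | some r => dynDic.insert path (inner.insert dtype (r + 1))
    | none   => dynDic.insert path (inner.insert dtype 1)
  | none => dynDic.insert path (PySem.Dict.empty.insert dtype 1)

def vDynamic (dtype : String) (dlist : List (String × String)) : List (String × List (String × Int)) :=
  ((dlist.foldl (vDynamicStep dtype) PySem.Dict.empty).items.map (fun p => (p.1, p.2.items)))

-- ===== PORT B =====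
def vDynamic_alt (dtype : String) (dlist : List (String × String)) : List (String × List (String × Int)) :=
  let counts := dlist.foldl (fun d item => d.insert item.1 (d.getD item.1 0 + 1)) PySem.Dict.empty
  counts.items.map (fun p => (p.1, [(dtype, if dtype == "RDT" then p.2 else 1)]))

-- ===== PRECONDITION & SPEC =====
def Spec_vDynamic (dtype : String) (dlist : List (String × String)) (out : List (String × List (String × Int))) : Prop := out = vDynamic_alt dtype dlist
instance (dtype : String) (dlist : List (String × String)) (out : List (String × List (String × Int))) : Decidable (Spec_vDynamic dtype dlist out) := by unfold Spec_vDynamic; infer_instance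

-- ===== CLAIM (what is proved, stated in full; the proofs are below) =====
def Claim_equal_vDynamic : Prop := ∀ (dtype : String) (dlist : List (String × String)), Dom_vDynamic dtype dlist → Spec_vDynamic dtype dlist (vDynamic dtype dlist)

-- ===== LEMMAS AND PROOFS =====

-- the inner dict A keeps for a path whose count so far is v
def vdInner (dtype : String) (v : Int) : PySem.Dict String Int :=
  PySem.Dict.empty.insert dtype (if dtype == "RDT" then v else 1)

def vdPair (dtype : String) (p : String × Int) : String × PySem.Dict String Int :=
  (p.1, vdInner dtype p.2)

-- A's whole state as the image of B's counter state
def vdEmit (dtype : String) (c : PySem.Dict String Int) : PySem.Dict String (PySem.Dict String Int) :=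
  PySem.Dict.mk (c.items.map (vdPair dtype))

theorem vd_get?_mk (dtype : String) (l : List (String × Int)) (k : String) :
    (PySem.Dict.mk (l.map (vdPair dtype))).get? k
      = ((PySem.Dict.mk l).get? k).map (vdInner dtype) := by
  induction l with
  | nil => rfl
  | cons p t ih =>
    obtain ⟨pk, pv⟩ := p
    by_cases h : (pk == k) = true
    · simp [vdPair, PySem.Dict.get?_mk_cons, h]
    · simp [vdPair, PySem.Dict.get?_mk_cons, h] at *
      exact ih

theorem vd_get?_emit (dtype : String) (c : PySem.Dict String Int) (k : String) :
    (vdEmit dtype c).get? k = (c.get? k).map (vdInner dtype) := by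
  obtain ⟨l⟩ := c; exact vd_get?_mk dtype l k

theorem vd_emit_insert (dtype : String) (c : PySem.Dict String Int) (k : String) (v : Int) :
    (vdEmit dtype c).insert k (vdInner dtype v) = vdEmit dtype (c.insert k v) := by
  obtain ⟨l⟩ := c
  have hc : (PySem.Dict.mk (l.map (vdPair dtype))).contains k = (PySem.Dict.mk l).contains k := by
    simp [PySem.Dict.contains_mk, List.any_map, Function.comp_def, vdPair]
  apply PySem.Dict.ext
  by_cases h : (PySem.Dict.mk l).contains k = true
  · simp only [vdEmit, PySem.Dict.items_insert, hc, h, if_true]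
    simp only [List.map_map]
    apply List.map_congr_left
    intro q _
    by_cases hq : (q.1 == k) = true
    · simp [vdPair, Function.comp, hq]
    · simp [vdPair, Function.comp, hq]
  · simp only [vdEmit, PySem.Dict.items_insert, hc, h, if_false, Bool.false_eq_true]
    simp [vdPair, List.map_append]

theorem vd_step_emit (dtype : String) (c : PySem.Dict String Int) (item : String × String) :
    vDynamicStep dtype (vdEmit dtype c) item
      = vdEmit dtype (c.insert item.1 (c.getD item.1 0 + 1)) := by
  unfold vDynamicStep
  dsimp only
  rw [vd_get?_emit]
  cases h : c.get? item.1 with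
  | none =>
    have hgd : c.getD item.1 0 = 0 := by simp [PySem.Dict.getD_eq_get?_getD, h]
    have hv : PySem.Dict.empty.insert dtype (1 : Int) = vdInner dtype (c.getD item.1 0 + 1) := by
      rw [vdInner, hgd]
      by_cases hd : (dtype == "RDT") = true <;> simp [hd]
    simp only [Option.map_none, hv]
    exact vd_emit_insert dtype c item.1 _
  | some cnt =>
    have hgd : c.getD item.1 0 = cnt := by simp [PySem.Dict.getD_eq_get?_getD, h]
    simp only [Option.map_some]
    by_cases hd : dtype = "RDT"
    · subst hd
      have hin : (vdInner "RDT" cnt).get? "RDT" = some cnt := by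
        rw [vdInner]
        simp only [beq_self_eq_true, if_true]
        exact PySem.Dict.get?_insert_self _ _ _
      rw [hin]; dsimp only
      have hv : (vdInner "RDT" cnt).insert "RDT" (cnt + 1) = vdInner "RDT" (c.getD item.1 0 + 1) := by
        rw [vdInner, vdInner, hgd]
        simp only [beq_self_eq_true, if_true, PySem.Dict.insert_insert_self]
      rw [hv]
      exact vd_emit_insert _ c item.1 _
    · have hin : (vdInner dtype cnt).get? "RDT" = none := by
        rw [vdInner, PySem.Dict.get?_insert_of_ne (hne := fun hh => hd hh.symm)]
        exact PySem.Dict.get?_empty _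
      rw [hin]; dsimp only
      have hv : (vdInner dtype cnt).insert dtype (1 : Int) = vdInner dtype (c.getD item.1 0 + 1) := by
        rw [vdInner, vdInner]
        have : (dtype == "RDT") = false := by simpa using hd
        simp only [this, Bool.false_eq_true, if_false, PySem.Dict.insert_insert_self]
      rw [hv]
      exact vd_emit_insert _ c item.1 _

theorem vd_loop (dtype : String) (l : List (String × String)) :
    ∀ c : PySem.Dict String Int,
      l.foldl (vDynamicStep dtype) (vdEmit dtype c)
        = vdEmit dtype (l.foldl (fun d item => d.insert item.1 (d.getD item.1 0 + 1)) c) := by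
  induction l with
  | nil => intro c; rfl
  | cons it t ih =>
    intro c
    simp only [List.foldl_cons, vd_step_emit]
    exact ih _

-- ===== VERDICT (by name: the statement is the Claim_ definition above) =====
theorem vDynamic_spec : Claim_equal_vDynamic := by
  intro dtype dlist _
  unfold Spec_vDynamic vDynamic vDynamic_alt
  have h0 : (PySem.Dict.empty : PySem.Dict String (PySem.Dict String Int))
      = vdEmit dtype PySem.Dict.empty := rfl
  rw [h0, vd_loop]
  simp only [vdEmit, List.map_map]
  apply List.map_congr_left
  intro p _
  rfl
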